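-- pv_equiv track=rewrite | github.com/pinellolab/CRISPR-HAWK | src/crisprhawk/reports.py | _polish_samples_phased
-- ===== SOURCE A (Python) =====
-- from collections import defaultdict
--
-- def _polish_samples_phased(samples: str) -> str:
--     if "|" not in samples:  # unphased genotype, no need for polishing
--         return samples
--     samplesmap = defaultdict(lambda: [0, 0])  # initialize samples map
--     for e in samples.split(","):  # retrive samples with genotypes
--         sample, genotype = e.split(":")
--         allele1, allele2 = map(int, genotype.split("|"))  # retrieve allele
--         # combine using max (equivalent to OR for binary values)
--         samplesmap[sample][0] = max(samplesmap[sample][0], allele1)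
--         samplesmap[sample][1] = max(samplesmap[sample][1], allele2)
--     return ",".join([f"{sample}:{a1}|{a2}" for sample, (a1, a2) in samplesmap.items()])
-- ===== SOURCE B (Python) =====
-- def _polish_samples_phased(samples: str) -> str:
--     if "|" not in samples:  # unphased genotype, nothing to polish
--         return samples
--     # pass 1: parse every entry into a flat (sample, allele1, allele2) table
--     entries = []
--     for e in samples.split(","):
--         sample, genotype = e.split(":")
--         a1, a2 = map(int, genotype.split("|"))
--         entries.append((sample, a1, a2))
--     # pass 2: distinct samples in first-seen order
--     seen = []
--     for t in entries:
--         if t[0] not in seen: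
--             seen.append(t[0])
--     # pass 3: reduce each sample's rows componentwise with max
--     out = []
--     for s in seen:
--         ps = [t for t in entries if t[0] == s]
--         out.append("{}:{}|{}".format(s, max(p[1] for p in ps), max(p[2] for p in ps)))
--     return ",".join(out)
-- ===== Notes on version B (the rewrite author's own statement) =====
-- stated objective: alternative
-- what changed: A aggregates online into a defaultdict while iterating; B parses once into a flat (sample,a1,a2) table, dedups the sample names, and then reduces each sample's rows componentwise with max in a separate pass (group-then-reduce, no dict).
-- outside the precondition, e.g. on _polish_samples_phased('S1:-1|0'): A returns 'S1:0|0', B returns 'S1:-1|0'; on _polish_samples_phased('S1:1|'): A raises ValueError, B raises ValueError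
import Mathlib
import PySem

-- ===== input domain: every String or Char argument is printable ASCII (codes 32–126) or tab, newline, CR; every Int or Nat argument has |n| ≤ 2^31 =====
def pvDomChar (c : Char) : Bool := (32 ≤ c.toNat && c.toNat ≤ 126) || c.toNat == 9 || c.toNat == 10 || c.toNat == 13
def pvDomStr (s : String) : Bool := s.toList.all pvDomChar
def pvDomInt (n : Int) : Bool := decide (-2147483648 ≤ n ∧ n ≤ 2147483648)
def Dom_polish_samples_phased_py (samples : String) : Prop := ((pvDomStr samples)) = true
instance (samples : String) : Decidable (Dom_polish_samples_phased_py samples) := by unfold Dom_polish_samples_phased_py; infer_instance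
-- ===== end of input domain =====

-- B replaces A's online defaultdict max-update by a three-phase group-then-reduce
-- (parse to a flat table, dedup the sample names, reduce each group with max); alternative decomposition, not faster.

-- shared parse of one "sample:g1|g2" entry (both Pythons contain these identical lines);
-- none = the ValueError Python raises on a malformed entry (split? is some: the separators are nonempty)
def pvParseEntry (e : String) : Option (String × Int × Int) :=
  match PySem.Str.split? e ":" with
  | some [sample, genotype] =>
    match PySem.Str.split? genotype "|" with
    | some [g1, g2] =>
      match PySem.Int.ofStr? g1, PySem.Int.ofStr? g2 with
      | some a1, some a2 => some (sample, a1, a2)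
      | _, _ => none
    | _ => none
  | _ => none

-- ===== PORT A =====
-- the dict-update body of A's loop (samplesmap[sample][0/1] = max(..)) on one parsed entry
def pvStepA (d : PySem.Dict String (Int × Int)) (t : String × Int × Int) :
    PySem.Dict String (Int × Int) :=
  d.insert t.1 (max (d.getD t.1 (0, 0)).1 t.2.1, max (d.getD t.1 (0, 0)).2 t.2.2)

def polish_samples_phased_py (samples : String) : String :=
  if PySem.Str.isIn "|" samples = false then samples
  else
    -- the fold threads Option: none = the ValueError Python raises (excluded by Pre_)
    ((((PySem.Str.split? samples ",").getD []).foldl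
        (fun (acc : Option (PySem.Dict String (Int × Int))) e =>
          acc.bind fun d => (pvParseEntry e).map (pvStepA d))
        (some PySem.Dict.empty)).map (fun d =>
      PySem.Str.join "," (d.items.map (fun p =>
        PySem.Str.join "" [p.1, ":", PySem.Int.toStr p.2.1, "|", PySem.Int.toStr p.2.2])))).getD ""

-- ===== PORT B =====
def polish_samples_phased_py_alt (samples : String) : String :=
  if PySem.Str.isIn "|" samples = false then samples
  else
    -- the collecting pass threads Option: none = the ValueError Python raises (excluded by Pre_)
    ((((PySem.Str.split? samples ",").getD []).foldl
        (fun (acc : Option (List (String × Int × Int))) e =>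
          acc.bind fun es => (pvParseEntry e).map (fun t => es ++ [t]))
        (some [])).map (fun entries =>
      PySem.Str.join "," ((entries.foldl (fun acc t => PySem.Set.add acc t.1)
          PySem.Set.empty).map (fun s =>
        PySem.Str.join "" [s, ":",
          PySem.Int.toStr ((PySem.List.max?
            ((entries.filter (fun t => t.1 == s)).map (fun t => t.2.1)) (fun x => x)).getD 0), "|",
          PySem.Int.toStr ((PySem.List.max?
            ((entries.filter (fun t => t.1 == s)).map (fun t => t.2.2)) (fun x => x)).getD 0)])))).getD ""

-- ===== PRECONDITION & SPEC =====
-- one entry is well-formed (so Python does not raise) and its two alleles are nonnegative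
def pvEntryOk (e : String) : Bool :=
  match PySem.Str.split? e ":" with
  | some [_, genotype] =>
    match PySem.Str.split? genotype "|" with
    | some [g1, g2] =>
      match PySem.Int.ofStr? g1, PySem.Int.ofStr? g2 with
      | some a1, some a2 => decide (0 ≤ a1 ∧ 0 ≤ a2)
      | _, _ => false
    | _ => false
  | _ => false

-- Pre_ excludes (a) malformed entries, on which A raises ValueError, and (b) entries with a
-- negative allele value — a corner no genotype string produces, where A's defaultdict [0,0]
-- seed silently clamps the per-sample max at 0 while B reports the true max: both defensible,
-- neither specified.
def Pre_polish_samples_phased_py (samples : String) : Prop :=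
  PySem.Str.isIn "|" samples = true →
    ∀ e ∈ (PySem.Str.split? samples ",").getD [], pvEntryOk e = true
instance (samples : String) : Decidable (Pre_polish_samples_phased_py samples) := by
  unfold Pre_polish_samples_phased_py; infer_instance

def pvWitness_polish_samples_phased_py : String := "NA01:1|0,NA02:0|0,NA01:0|1"

def Spec_polish_samples_phased_py (samples : String) (out : String) : Prop :=
  out = polish_samples_phased_py_alt samples
instance (samples : String) (out : String) : Decidable (Spec_polish_samples_phased_py samples out) := by
  unfold Spec_polish_samples_phased_py; infer_instance

-- ===== CLAIM (what is proved, stated in full; the proofs are below) =====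
def Claim_equal_polish_samples_phased_py : Prop :=
  ∀ (samples : String), Dom_polish_samples_phased_py samples →
    Pre_polish_samples_phased_py samples →
    Spec_polish_samples_phased_py samples (polish_samples_phased_py samples)

-- ===== LEMMAS AND PROOFS =====

theorem pvEntryOk_parse {e : String} (h : pvEntryOk e = true) :
    ∃ s a1 a2, pvParseEntry e = some (s, a1, a2) ∧ 0 ≤ a1 ∧ 0 ≤ a2 := by
  unfold pvEntryOk at h
  unfold pvParseEntry
  split at h
  next sample genotype _ =>
    split at h
    next g1 g2 _ =>
      split at h
      next a1 a2 _ _ =>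
        simp at h
        exact ⟨sample, a1, a2, rfl, h.1, h.2⟩
      next => exact absurd h (by simp)
    next => exact absurd h (by simp)
  next => exact absurd h (by simp)

-- threading the Option through A's fold
theorem pv_foldA (L : List String) (d : PySem.Dict String (Int × Int))
    (h : ∀ e ∈ L, (pvParseEntry e).isSome) :
    L.foldl (fun (acc : Option (PySem.Dict String (Int × Int))) e =>
        acc.bind fun d => (pvParseEntry e).map (pvStepA d)) (some d)
      = some ((L.filterMap pvParseEntry).foldl pvStepA d) := by
  induction L generalizing d with
  | nil => rfl
  | cons e L ih =>
    obtain ⟨t, ht⟩ := Option.isSome_iff_exists.mp (h e (by simp))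
    simp only [List.foldl_cons, List.filterMap_cons, ht, Option.bind_some, Option.map_some]
    exact ih _ (fun x hx => h x (by simp [hx]))

-- threading the Option through B's collecting fold
theorem pv_foldB (L : List String) (es : List (String × Int × Int))
    (h : ∀ e ∈ L, (pvParseEntry e).isSome) :
    L.foldl (fun (acc : Option (List (String × Int × Int))) e =>
        acc.bind fun es => (pvParseEntry e).map (fun t => es ++ [t])) (some es)
      = some (es ++ L.filterMap pvParseEntry) := by
  induction L generalizing es with
  | nil => simp
  | cons e L ih =>
    obtain ⟨t, ht⟩ := Option.isSome_iff_exists.mp (h e (by simp))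
    simp only [List.foldl_cons, List.filterMap_cons, ht, Option.bind_some, Option.map_some]
    rw [ih _ (fun x hx => h x (by simp [hx]))]
    simp

-- the per-sample value A's dict holds after the whole fold
def pvVal (entries : List (String × Int × Int)) (s : String) : Int × Int :=
  (((entries.filter (fun t => t.1 == s)).map (fun t => t.2.1)).foldl max 0,
   ((entries.filter (fun t => t.1 == s)).map (fun t => t.2.2)).foldl max 0)

-- characterisation of A's dict: items = first-seen sample order, values = 0-seeded maxima
theorem pv_items_fold (entries : List (String × Int × Int)) :
    (entries.foldl pvStepA PySem.Dict.empty).items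
      = (PySem.Set.ofList (entries.map (·.1))).map (fun s => (s, pvVal entries s)) := by
  induction entries using List.reverseRecOn with
  | nil => rfl
  | append_singleton es t ih =>
    rw [List.foldl_append, List.foldl_cons, List.foldl_nil]
    set D := es.foldl pvStepA PySem.Dict.empty with hD
    have hkeys : D.keys
        = PySem.Set.ofList (es.map (·.1)) := by
      simp only [PySem.Dict.keys, ih, List.map_map]
      have hcomp : ((fun x : String × (Int × Int) => x.1) ∘ fun s => (s, pvVal es s))
          = fun s => s := rfl
      rw [hcomp, List.map_id']
    have hnodup : D.keys.Nodup := by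
      rw [hkeys]; exact PySem.Set.nodup_ofList _
    have hc : D.contains t.1
        = decide (t.1 ∈ es.map (·.1)) := by
      rw [PySem.Dict.contains_eq_decide_mem_keys, hkeys]
      simp [PySem.Set.mem_ofList]
    by_cases hmem : t.1 ∈ es.map (·.1)
    · -- sample already present: in-place overwrite
      have hct : D.contains t.1 = true := by
        rw [hc]; simpa using hmem
      have hitem : (t.1, pvVal es t.1) ∈ D.items := by
        rw [ih]
        exact List.mem_map_of_mem ((PySem.Set.mem_ofList _ _).mpr hmem)
      have hgetD : D.getD t.1 (0, 0) = pvVal es t.1 :=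
        PySem.Dict.getD_of_get?_eq_some _ _
          (PySem.Dict.get?_of_mem_items _ hitem hnodup)
      have hofl : PySem.Set.ofList ((es ++ [t]).map (·.1))
          = PySem.Set.ofList (es.map (·.1)) := by
        rw [List.map_append, List.map_cons, List.map_nil, PySem.Set.ofList_append_singleton]
        unfold PySem.Set.add
        have hcm : PySem.Set.contains (PySem.Set.ofList (es.map (·.1))) t.1 = true := by
          rw [PySem.Set.contains_iff]
          exact (PySem.Set.mem_ofList _ _).mpr hmem
        rw [hcm]
        simp
      unfold pvStepA
      rw [hgetD, PySem.Dict.items_insert_of_contains _ _ hct, ih, hofl, List.map_map]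
      refine List.map_congr_left (fun s hs => ?_)
      by_cases hst : s = t.1
      · subst hst
        simp only [Function.comp_apply, beq_self_eq_true, if_true]
        simp [pvVal, List.filter_append, List.foldl_append]
      · have hb : (s == t.1) = false := by simp [hst]
        simp only [Function.comp_apply, hb, Bool.false_eq_true, if_false]
        have hb2 : (t.1 == s) = false := by rw [beq_eq_false_iff_ne]; exact Ne.symm hst
        have hfil : (es ++ [t]).filter (fun x => x.1 == s) = es.filter (fun x => x.1 == s) := by
          rw [List.filter_append]
          simp [hb2]
        simp [pvVal, hfil]
    · -- new sample: appended at the end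
      have hcf : D.contains t.1 = false := by
        rw [hc]; simpa using hmem
      have hgetD : D.getD t.1 (0, 0) = (0, 0) :=
        PySem.Dict.getD_of_not_contains _ _ hcf
      have hofl : PySem.Set.ofList ((es ++ [t]).map (·.1))
          = PySem.Set.ofList (es.map (·.1)) ++ [t.1] := by
        rw [List.map_append, List.map_cons, List.map_nil, PySem.Set.ofList_append_singleton]
        unfold PySem.Set.add
        have hcm : PySem.Set.contains (PySem.Set.ofList (es.map (·.1))) t.1 = false := by
          rw [← Bool.not_eq_true, PySem.Set.contains_iff]
          simpa [PySem.Set.mem_ofList] using hmem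
        rw [hcm]
        simp
      have hfilnil : es.filter (fun x => x.1 == t.1) = [] := by
        rw [List.filter_eq_nil_iff]
        intro x hx
        simp only [beq_iff_eq]
        intro hx1
        exact hmem (hx1 ▸ List.mem_map_of_mem hx)
      unfold pvStepA
      rw [hgetD, PySem.Dict.items_insert_of_not_contains _ _ hcf, ih, hofl, List.map_append]
      congr 1
      · refine List.map_congr_left (fun s hs => ?_)
        have hsne : (t.1 == s) = false := by
          have : s ∈ es.map (·.1) := (PySem.Set.mem_ofList _ _).mp hs
          simp only [beq_eq_false_iff_ne, ne_eq]
          intro h; exact hmem (h ▸ this)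
        have hfil : (es ++ [t]).filter (fun x => x.1 == s) = es.filter (fun x => x.1 == s) := by
          rw [List.filter_append]; simp [hsne]
        simp [pvVal, hfil]
      · simp [pvVal, List.filter_append, hfilnil, List.filter_cons]

-- Python max() over a nonempty list of nonnegative ints equals the 0-seeded running max
theorem pv_max_nonneg (l : List Int) (hne : l ≠ []) (hnn : ∀ x ∈ l, 0 ≤ x) :
    (PySem.List.max? l (fun x => x)).getD 0 = l.foldl max 0 := by
  cases l with
  | nil => exact absurd rfl hne
  | cons x tl =>
    rw [PySem.List.max?_id_cons]
    have : max 0 x = x := max_eq_right (hnn x (by simp))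
    simp [List.foldl_cons, this]

-- ===== VERDICT (by name: the statement is the Claim_ definition above) =====
theorem polish_samples_phased_py_spec : Claim_equal_polish_samples_phased_py := by
  intro samples _ hpre
  unfold Spec_polish_samples_phased_py
  unfold polish_samples_phased_py polish_samples_phased_py_alt
  by_cases hin : PySem.Str.isIn "|" samples = false
  · rw [if_pos hin, if_pos hin]
  · have hin' : PySem.Str.isIn "|" samples = true := by
      revert hin; cases PySem.Str.isIn "|" samples <;> simp
    rw [if_neg hin, if_neg hin]
    have hok := hpre hin'
    have hsome : ∀ e ∈ (PySem.Str.split? samples ",").getD [], (pvParseEntry e).isSome := by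
      intro e he
      obtain ⟨s, a1, a2, hp, _, _⟩ := pvEntryOk_parse (hok e he)
      simp [hp]
    rw [pv_foldA _ PySem.Dict.empty hsome, pv_foldB _ [] hsome]
    simp only [Option.map_some, Option.getD_some, List.nil_append]
    set entries := ((PySem.Str.split? samples ",").getD []).filterMap pvParseEntry with hent
    have hnn : ∀ t ∈ entries, 0 ≤ t.2.1 ∧ 0 ≤ t.2.2 := by
      intro t ht
      rw [hent, List.mem_filterMap] at ht
      obtain ⟨e, he, hpe⟩ := ht
      obtain ⟨s, a1, a2, hp, h1, h2⟩ := pvEntryOk_parse (hok e he)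
      rw [hp] at hpe
      cases hpe
      exact ⟨h1, h2⟩
    have hseen : entries.foldl (fun acc t => PySem.Set.add acc t.1) PySem.Set.empty
        = PySem.Set.ofList (entries.map (·.1)) := by
      rw [← PySem.Set.update_map_eq_foldl_add]
      exact PySem.Set.update_nil_left _
    rw [pv_items_fold entries, hseen, List.map_map]
    refine congrArg _ (List.map_congr_left (fun s hs => ?_))
    have hsmem : s ∈ entries.map (·.1) := (PySem.Set.mem_ofList _ _).mp hs
    obtain ⟨t, ht, hts⟩ := List.mem_map.mp hsmem
    have htfil : t ∈ entries.filter (fun t => t.1 == s) := by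
      rw [List.mem_filter]
      exact ⟨ht, by simp [hts]⟩
    have hfne : entries.filter (fun t => t.1 == s) ≠ [] := List.ne_nil_of_mem htfil
    have h1 : (PySem.List.max? ((entries.filter (fun t => t.1 == s)).map (fun t => t.2.1))
        (fun x => x)).getD 0
        = ((entries.filter (fun t => t.1 == s)).map (fun t => t.2.1)).foldl max 0 := by
      refine pv_max_nonneg _ (by simpa using hfne) ?_
      intro x hx
      obtain ⟨u, hu, hux⟩ := List.mem_map.mp hx
      exact hux ▸ (hnn u (List.mem_of_mem_filter hu)).1
    have h2 : (PySem.List.max? ((entries.filter (fun t => t.1 == s)).map (fun t => t.2.2))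
        (fun x => x)).getD 0
        = ((entries.filter (fun t => t.1 == s)).map (fun t => t.2.2)).foldl max 0 := by
      refine pv_max_nonneg _ (by simpa using hfne) ?_
      intro x hx
      obtain ⟨u, hu, hux⟩ := List.mem_map.mp hx
      exact hux ▸ (hnn u (List.mem_of_mem_filter hu)).2
    simp [pvVal, h1, h2]
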